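-- pv_equiv track=rewrite | github.com/CyFI-Lab-Public/RetroScope | system/media/camera/docs/metadata_helpers.py | javadoc
-- ===== SOURCE A (Python) =====
-- def javadoc(text, indent = 4):
--   """
--   Format text block as a javadoc comment section
--
--   Args:
--     text: A multi-line string to format
--     indent: baseline level of indentation for javadoc block
--   Returns:
--     String with:
--     - Indent and * for insertion into a Javadoc comment block
--     - Leading/trailing whitespace removed
--     - Paragraph tags added on newlines between paragraphs
--
--   Example:
--     "This is a comment for Javadoc\n" +
--     "     with multiple lines, that should be   \n" +
--     "     formatted better\n" +
--     "\n" +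
--     "    That covers multiple lines as well\n"
--
--     transforms to
--     "    * <p>\n" +
--     "    * This is a comment for Javadoc\n" +
--     "    * with multiple lines, that should be\n" +
--     "    * formatted better\n" +
--     "    * </p><p>\n" +
--     "    * That covers multiple lines as well\n" +
--     "    * </p>\n"
--   """
--   comment_prefix = " " * indent + " * ";
--   comment_para = comment_prefix + "</p><p>\n";
--   javatext = comment_prefix + "<p>\n";
--
--   in_body = False # Eat empty lines at start
--   first_paragraph = True
--   for line in ( line.strip() for line in text.splitlines() ):
--     if not line:
--       in_body = False # collapse multi-blank lines into one
--     else: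
--       # Insert para end/start after a span of blank lines except for
--       # the first paragraph, which got a para start already
--       if not in_body and not first_paragraph:
--         javatext = javatext + comment_para
--
--       in_body = True
--       first_paragraph = False
--
--       javatext = javatext + comment_prefix + line + "\n";
--
--   # Close last para tag
--   javatext = javatext + comment_prefix + "</p>\n";
--
--   return javatext
-- ===== SOURCE B (Python) =====
-- def javadoc(text, indent = 4):
--   # Phase 1: group consecutive non-empty stripped lines into paragraphs.
--   stripped = [line.strip() for line in text.splitlines()]
--   paragraphs = []
--   i, n = 0, len(stripped)
--   while i < n:
--     if not stripped[i]:
--       i += 1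
--       continue
--     j = i
--     while j < n and stripped[j]:
--       j += 1
--     paragraphs.append(stripped[i:j])
--     i = j
--   # Phase 2: emit wrapper, paragraph blocks, separators.
--   prefix = " " * indent + " * "
--   blocks = ["".join(prefix + line + "\n" for line in p) for p in paragraphs]
--   return prefix + "<p>\n" + (prefix + "</p><p>\n").join(blocks) + prefix + "</p>\n"
-- ===== Notes on version B (the rewrite author's own statement) =====
-- stated objective: simpler
-- what changed: Replaces the flag-driven (in_body/first_paragraph) single-pass state machine by a two-phase decomposition: first group consecutive non-empty stripped lines into paragraphs, then emit the javadoc wrapper with the paragraph blocks joined by the </p><p> separator.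
import Mathlib
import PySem

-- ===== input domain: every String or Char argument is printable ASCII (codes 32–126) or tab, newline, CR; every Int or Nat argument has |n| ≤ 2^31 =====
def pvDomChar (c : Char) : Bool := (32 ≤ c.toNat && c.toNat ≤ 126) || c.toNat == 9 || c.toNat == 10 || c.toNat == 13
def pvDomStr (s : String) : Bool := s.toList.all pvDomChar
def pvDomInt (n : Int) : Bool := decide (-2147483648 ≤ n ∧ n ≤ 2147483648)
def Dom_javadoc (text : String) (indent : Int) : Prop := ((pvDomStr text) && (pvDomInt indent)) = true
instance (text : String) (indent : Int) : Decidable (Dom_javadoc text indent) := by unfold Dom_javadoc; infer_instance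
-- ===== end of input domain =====

-- B replaces A's flag-driven state machine by a two-phase group-then-emit decomposition (objective: simpler).

-- ===== PORT A =====
-- A's for-loop over stripped lines, state (in_body, first_paragraph, javatext accumulator).
def jdLoopA (pre para : String) : List String → Bool → Bool → String → String
  | [], _, _, acc => acc
  | l :: t, inBody, firstPara, acc =>
      if l = "" then
        jdLoopA pre para t false firstPara acc          -- collapse blank lines
      else
        let acc1 := if inBody = false ∧ firstPara = false then acc ++ para else acc
        jdLoopA pre para t true false (acc1 ++ pre ++ l ++ "\n")

def javadoc (text : String) (indent : Int) : String :=
  -- " " * indent: Python yields "" for indent ≤ 0, exactly List.replicate indent.toNat ' '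
  let commentPrefix := String.ofList (List.replicate indent.toNat ' ') ++ " * "
  let commentPara := commentPrefix ++ "</p><p>\n"
  let javatext := commentPrefix ++ "<p>\n"
  let body := jdLoopA commentPrefix commentPara
      ((PySem.Str.splitlines text).map PySem.Str.strip) false true javatext
  body ++ commentPrefix ++ "</p>\n"

-- ===== PORT B =====
-- group consecutive non-empty stripped lines into paragraphs (B's phase-1 scan)
def jdParas : List String → List (List String)
  | [] => []
  | l :: t =>
      if l = "" then jdParas t
      else (l :: t.takeWhile (· != "")) :: jdParas (t.dropWhile (· != ""))
  termination_by ls => ls.length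
  decreasing_by
    · simp
    · have := List.length_dropWhile_le (p := (· != "")) (l := t); simp; omega

-- "".join(prefix + line + "\n" for line in p)
def jdBlock (pre : String) : List String → String
  | [] => ""
  | l :: t => pre ++ l ++ "\n" ++ jdBlock pre t

-- sep.join(blocks), ported by hand: first block, then sep before each later block
def jdSepAll (sep : String) : List String → String
  | [] => ""
  | b :: bs => sep ++ b ++ jdSepAll sep bs

def jdJoin (sep : String) : List String → String
  | [] => ""
  | b :: bs => b ++ jdSepAll sep bs

def javadoc_alt (text : String) (indent : Int) : String :=
  let stripped := (PySem.Str.splitlines text).map PySem.Str.strip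
  let paragraphs := jdParas stripped
  let prefix_ := String.ofList (List.replicate indent.toNat ' ') ++ " * "
  let blocks := paragraphs.map (jdBlock prefix_)
  prefix_ ++ "<p>\n" ++ jdJoin (prefix_ ++ "</p><p>\n") blocks ++ prefix_ ++ "</p>\n"

-- ===== PRECONDITION & SPEC =====
def Spec_javadoc (text : String) (indent : Int) (out : String) : Prop := out = javadoc_alt text indent
instance (text : String) (indent : Int) (out : String) : Decidable (Spec_javadoc text indent out) := by unfold Spec_javadoc; infer_instance

-- ===== CLAIM (what is proved, stated in full; the proofs are below) =====
def Claim_equal_javadoc : Prop := ∀ (text : String) (indent : Int), Dom_javadoc text indent → Spec_javadoc text indent (javadoc text indent)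

-- ===== LEMMAS AND PROOFS =====

lemma jdLoopA_blank (pre para : String) (t : List String) (ib fp : Bool) (acc : String) :
    jdLoopA pre para ("" :: t) ib fp acc = jdLoopA pre para t false fp acc := by
  simp [jdLoopA]

lemma jdLoopA_ne (pre para l : String) (t : List String) (ib fp : Bool) (acc : String)
    (h : l ≠ "") :
    jdLoopA pre para (l :: t) ib fp acc
      = jdLoopA pre para t true false
          ((if ib = false ∧ fp = false then acc ++ para else acc) ++ pre ++ l ++ "\n") := by
  simp [jdLoopA, h]

lemma jdParas_blank (t : List String) : jdParas ("" :: t) = jdParas t := by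
  simp [jdParas]

lemma jdParas_ne (l : String) (t : List String) (h : l ≠ "") :
    jdParas (l :: t) = (l :: t.takeWhile (· != "")) :: jdParas (t.dropWhile (· != "")) := by
  simp [jdParas, h]

-- A's state machine, characterised per reachable state against B's paragraph grouping:
-- (F,T) start; (F,F) after a blank following some output; (T,F) inside a paragraph.
lemma jdLoop_main (pre para : String) (ls : List String) : ∀ acc : String,
    jdLoopA pre para ls false true acc
      = acc ++ jdJoin para ((jdParas ls).map (jdBlock pre)) ∧
    jdLoopA pre para ls false false acc
      = acc ++ jdSepAll para ((jdParas ls).map (jdBlock pre)) ∧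
    jdLoopA pre para ls true false acc
      = acc ++ jdBlock pre (ls.takeWhile (· != ""))
            ++ jdSepAll para ((jdParas (ls.dropWhile (· != ""))).map (jdBlock pre)) := by
  induction ls with
  | nil =>
      intro acc
      simp [jdLoopA, jdParas, jdJoin, jdSepAll, jdBlock, String.append_empty]
  | cons l t ih =>
      intro acc
      by_cases h : l = ""
      · subst h
        rw [jdLoopA_blank, jdLoopA_blank, jdLoopA_blank, jdParas_blank]
        refine ⟨(ih acc).1, (ih acc).2.1, ?_⟩
        simp [jdBlock, (ih acc).2.1, jdParas_blank, String.append_empty]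
      · have hne : (l != "") = true := by simp [h]
        rw [jdLoopA_ne _ _ _ _ _ _ _ h, jdLoopA_ne _ _ _ _ _ _ _ h, jdLoopA_ne _ _ _ _ _ _ _ h,
          jdParas_ne _ _ h]
        refine ⟨?_, ?_, ?_⟩
        · -- state (F,T): no separator, start first paragraph
          rw [if_neg (by simp), (ih _).2.2]
          simp [jdJoin, jdBlock, String.append_assoc]
        · -- state (F,F): emit separator, start next paragraph
          rw [if_pos ⟨rfl, rfl⟩, (ih _).2.2]
          simp [jdSepAll, jdBlock, String.append_assoc]
        · -- state (T,F): continue current paragraph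
          rw [if_neg (by simp), (ih _).2.2]
          simp [hne, jdBlock, String.append_assoc]

-- ===== VERDICT (by name: the statement is the Claim_ definition above) =====
theorem javadoc_spec : Claim_equal_javadoc := by
  intro text indent _
  show javadoc text indent = javadoc_alt text indent
  simp only [javadoc, javadoc_alt]
  rw [(jdLoop_main _ _ _ _).1]
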